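-- pv_equiv track=rewrite | github.com/jute0311/B21 | selectways.py | selectPutPlaces
-- ===== SOURCE A (Python) =====
-- def selectPutPlaces(current_places,field):
--     '''
--     広げたスペースのところに置いていく
--     '''
--
--     selected_legalhands = []
--
--     for place in current_places:
--         i = place[0]
--         j = place[1]
--         if 0 < i < 19 and 0 < j < 19 :
--             if field[i-1][j] != 0 and field[i-1][j] != 10 and field[i-1][j] != 11 \
--                 and field[i][j-1] != 0 and field[i][j-1] != 10 and field[i][j-1] != 11\
--                 and field[i-1][j-1] == 1:
--                 selected_legalhands.append(place)
--             elif field[i][j-1] != 0 and field[i][j-1] != 10 and field[i][j-1] != 11 \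
--                 and field[i+1][j] != 0 and  field[i+1][j] != 10 and field[i+1][j] != 11 \
--                 and field[i+1][j-1] == 1:
--                 selected_legalhands.append(place)
--             elif field[i+1][j] != 0 and  field[i+1][j] != 10 and field[i+1][j] != 11 \
--                 and field[i][j+1] != 0 and field[i][j+1] != 10 and field[i][j+1] != 11 \
--                 and field[i+1][j+1] == 1:
--                 selected_legalhands.append(place)
--             elif field[i][j+1] != 0 and field[i][j+1] != 10 and field[i][j+1] != 11 \
--                 and field[i-1][j] != 0 and field[i-1][j] != 10 and field[i-1][j] != 11 \
--                 and field[i-1][j+1] == 1: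
--                 selected_legalhands.append(place)
--
--     if selected_legalhands != [] :
--         return selected_legalhands
--     else :
--         return current_places
-- ===== SOURCE B (Python) =====
-- def selectPutPlaces(current_places, field):
--     '''
--     広げたスペースのところに置いていく
--     '''
--     def good(v):
--         return v != 0 and v != 10 and v != 11
--
--     def get(r, c):
--         if 0 <= r < len(field) and 0 <= c < len(field[r]):
--             return field[r][c]
--         return 0
--
--     # Sweep the field once: every cell equal to 1 acts as the diagonal certificate
--     # of up to four neighbouring places; collect all certified places in a set.
--     certified = set()
--     for r, row in enumerate(field):
--         for c, v in enumerate(row):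
--             if v == 1:
--                 for di in (1, -1):
--                     for dj in (1, -1):
--                         i, j = r + di, c + dj
--                         if 0 < i < 19 and 0 < j < 19 and good(get(r, j)) and good(get(i, c)):
--                             certified.add((i, j))
--     selected = [p for p in current_places if p in certified]
--     return selected if selected else current_places
-- ===== Notes on version B (the rewrite author's own statement) =====
-- stated objective: alternative
-- what changed: Instead of testing each place against four neighbor-condition branches, B sweeps the field once, treating every cell equal to 1 as the diagonal certificate of up to four adjacent places whose two orthogonal edge cells are good, collects the certified places into a set, and then keeps the places of current_places that are members; the per-place branch chain disappears.
-- outside the precondition, e.g. on selectPutPlaces([(1, 1)], [[1, 1], [1, 1]]): A returns [(1, 1)], B returns [(1, 1)]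
import Mathlib
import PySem

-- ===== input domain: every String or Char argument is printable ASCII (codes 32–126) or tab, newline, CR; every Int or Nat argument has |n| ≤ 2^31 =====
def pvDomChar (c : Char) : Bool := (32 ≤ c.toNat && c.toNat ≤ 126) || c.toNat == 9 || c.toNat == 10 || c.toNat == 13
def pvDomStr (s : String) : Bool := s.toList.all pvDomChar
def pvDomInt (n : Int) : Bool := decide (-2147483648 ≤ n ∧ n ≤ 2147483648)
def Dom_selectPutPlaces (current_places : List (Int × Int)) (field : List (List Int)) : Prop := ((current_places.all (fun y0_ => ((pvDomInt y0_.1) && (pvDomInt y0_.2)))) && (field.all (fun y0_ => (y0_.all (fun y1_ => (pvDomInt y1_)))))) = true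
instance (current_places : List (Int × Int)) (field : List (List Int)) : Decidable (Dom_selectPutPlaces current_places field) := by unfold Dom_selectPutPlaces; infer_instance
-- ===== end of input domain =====

-- B replaces A's per-place four-branch scan by a single sweep over the FIELD that collects,
-- into a set, every place certified by some diagonal 1-cell, then filters current_places by
-- membership (alternative decomposition; same asymptotic cost).


-- ===== PORT A =====
-- field[i][j]; Pre_ guarantees every access A performs is in range, so the getD defaults are never used
def fget (field : List (List Int)) (i j : Int) : Int :=
  (PySem.List.pyGet? ((PySem.List.pyGet? field i).getD []) j).getD 0

def stepA (field : List (List Int)) (acc : List (Int × Int)) (place : Int × Int) : List (Int × Int) :=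
  let i := place.1
  let j := place.2
  if 0 < i ∧ i < 19 ∧ 0 < j ∧ j < 19 then
    if fget field (i-1) j != 0 && fget field (i-1) j != 10 && fget field (i-1) j != 11
        && fget field i (j-1) != 0 && fget field i (j-1) != 10 && fget field i (j-1) != 11
        && fget field (i-1) (j-1) == 1 then acc ++ [place]
    else if fget field i (j-1) != 0 && fget field i (j-1) != 10 && fget field i (j-1) != 11
        && fget field (i+1) j != 0 && fget field (i+1) j != 10 && fget field (i+1) j != 11
        && fget field (i+1) (j-1) == 1 then acc ++ [place]
    else if fget field (i+1) j != 0 && fget field (i+1) j != 10 && fget field (i+1) j != 11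
        && fget field i (j+1) != 0 && fget field i (j+1) != 10 && fget field i (j+1) != 11
        && fget field (i+1) (j+1) == 1 then acc ++ [place]
    else if fget field i (j+1) != 0 && fget field i (j+1) != 10 && fget field i (j+1) != 11
        && fget field (i-1) j != 0 && fget field (i-1) j != 10 && fget field (i-1) j != 11
        && fget field (i-1) (j+1) == 1 then acc ++ [place]
    else acc
  else acc

def selectPutPlaces (current_places : List (Int × Int)) (field : List (List Int)) : List (Int × Int) :=
  let selected_legalhands := current_places.foldl (stepA field) []
  if selected_legalhands ≠ [] then selected_legalhands else current_places

-- ===== PORT B =====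
def goodB (v : Int) : Bool := v != 0 && v != 10 && v != 11

-- Source B's bounds-checked get(r, c)
def cellB (field : List (List Int)) (r c : Int) : Int :=
  if 0 ≤ r ∧ r < (field.length : Int) ∧ 0 ≤ c ∧ c < ((PySem.List.pyGetD field r []).length : Int)
  then PySem.List.pyGetD (PySem.List.pyGetD field r []) c 0
  else 0

def deltas : List (Int × Int) := [(1, 1), (1, -1), (-1, 1), (-1, -1)]

-- the guard of the innermost loop of Source B, for diagonal cell (r,c) and offset d
def certCond (field : List (List Int)) (r c : Int) (d : Int × Int) : Bool :=
  decide (0 < r + d.1 ∧ r + d.1 < 19 ∧ 0 < c + d.2 ∧ c + d.2 < 19) &&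
  goodB (cellB field r (c + d.2)) && goodB (cellB field (r + d.1) c)

def addCert (field : List (List Int)) (r c : Int) (s : PySem.Set (Int × Int)) : PySem.Set (Int × Int) :=
  deltas.foldl (fun s d =>
    if certCond field r c d then PySem.Set.add s (r + d.1, c + d.2) else s) s

def certSet (field : List (List Int)) : PySem.Set (Int × Int) :=
  (PySem.List.enumerate field).foldl (fun s rr =>
    (PySem.List.enumerate rr.2).foldl (fun s cv =>
      if cv.2 == 1 then addCert field rr.1 cv.1 s else s) s) PySem.Set.empty

def selectPutPlaces_alt (current_places : List (Int × Int)) (field : List (List Int)) : List (Int × Int) :=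
  let certified := certSet field
  let selected := current_places.filter (fun p => PySem.Set.contains certified p)
  if selected ≠ [] then selected else current_places

-- ===== PRECONDITION & SPEC =====
-- Pre_ requires, for every place passing the interior guard, the full 3×3 neighborhood to
-- exist in field (otherwise Python raises IndexError); this is slightly narrower than "A
-- returns", because short-circuit evaluation can let A return without touching a missing
-- cell (see the cited example, where both programs return the same value anyway).
def Pre_selectPutPlaces (current_places : List (Int × Int)) (field : List (List Int)) : Prop :=
  ∀ p ∈ current_places, 0 < p.1 → p.1 < 19 → 0 < p.2 → p.2 < 19 →
    p.1 + 1 < (field.length : Int) ∧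
    ∀ r ∈ [p.1 - 1, p.1, p.1 + 1],
      p.2 + 1 < (((PySem.List.pyGet? field r).getD []).length : Int)
instance (current_places : List (Int × Int)) (field : List (List Int)) : Decidable (Pre_selectPutPlaces current_places field) := by unfold Pre_selectPutPlaces; infer_instance

def pvWitness_selectPutPlaces : (List (Int × Int)) × List (List Int) :=
  ([(1, 1)], [[1, 1, 1], [1, 1, 1], [1, 1, 1]])

def Spec_selectPutPlaces (current_places : List (Int × Int)) (field : List (List Int)) (out : List (Int × Int)) : Prop := out = selectPutPlaces_alt current_places field
instance (current_places : List (Int × Int)) (field : List (List Int)) (out : List (Int × Int)) : Decidable (Spec_selectPutPlaces current_places field out) := by unfold Spec_selectPutPlaces; infer_instance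

-- ===== CLAIM (what is proved, stated in full; the proofs are below) =====
def Claim_equal_selectPutPlaces : Prop := ∀ (current_places : List (Int × Int)) (field : List (List Int)), Dom_selectPutPlaces current_places field → Pre_selectPutPlaces current_places field → Spec_selectPutPlaces current_places field (selectPutPlaces current_places field)

-- ===== LEMMAS AND PROOFS =====
-- A's condition on a single place, as one boolean (proof-side helper)
def condA (field : List (List Int)) (p : Int × Int) : Bool :=
  decide (0 < p.1 ∧ p.1 < 19 ∧ 0 < p.2 ∧ p.2 < 19) &&
  (  (goodB (fget field (p.1-1) p.2) && goodB (fget field p.1 (p.2-1)) && (fget field (p.1-1) (p.2-1) == 1))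
  || (goodB (fget field p.1 (p.2-1)) && goodB (fget field (p.1+1) p.2) && (fget field (p.1+1) (p.2-1) == 1))
  || (goodB (fget field (p.1+1) p.2) && goodB (fget field p.1 (p.2+1)) && (fget field (p.1+1) (p.2+1) == 1))
  || (goodB (fget field p.1 (p.2+1)) && goodB (fget field (p.1-1) p.2) && (fget field (p.1-1) (p.2+1) == 1)) )

theorem chain_or (c1 c2 c3 c4 : Bool) (t e : List (Int × Int)) :
    (if c1 then t else if c2 then t else if c3 then t else if c4 then t else e)
    = if (c1 || c2 || c3 || c4) then t else e := by
  cases c1 <;> cases c2 <;> cases c3 <;> cases c4 <;> simp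

theorem step_eq (field : List (List Int)) (acc : List (Int × Int)) (p : Int × Int) :
    stepA field acc p = if condA field p then acc ++ [p] else acc := by
  rcases p with ⟨i, j⟩
  by_cases h : 0 < i ∧ i < 19 ∧ 0 < j ∧ j < 19
  · simp only [stepA, condA, goodB, h, decide_true, Bool.true_and, Bool.and_assoc,
      and_self, if_true]
    rw [chain_or]
  · simp [stepA, condA, h]

theorem foldl_stepA (field : List (List Int)) :
    ∀ (l : List (Int × Int)) (acc : List (Int × Int)),
      l.foldl (stepA field) acc = acc ++ l.filter (condA field) := by
  intro l
  induction l with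
  | nil => simp [List.foldl]
  | cons p l ih =>
    intro acc
    rw [List.foldl_cons, step_eq, ih]
    by_cases h : condA field p = true <;> simp [h]

-- nonneg indices: both getters reduce to List.getD with defaults
theorem fget_nonneg (field : List (List Int)) (r c : Int) (hr : 0 ≤ r) (hc : 0 ≤ c) :
    fget field r c = (field.getD r.toNat []).getD c.toNat 0 := by
  rw [fget, PySem.List.pyGet?_of_nonneg field hr, PySem.List.pyGet?_of_nonneg _ hc]
  simp [List.getD_eq_getElem?_getD]

theorem cellB_nonneg (field : List (List Int)) (r c : Int) (hr : 0 ≤ r) (hc : 0 ≤ c) :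
    cellB field r c = (field.getD r.toNat []).getD c.toNat 0 := by
  rw [cellB, PySem.List.pyGetD_of_nonneg field [] hr, PySem.List.pyGetD_of_nonneg _ 0 hc]
  split_ifs with h
  · rfl
  · by_cases hrl : r < (field.length : Int)
    · have hcl : (field.getD r.toNat []).length ≤ c.toNat := by
        rcases Nat.lt_or_ge c.toNat (field.getD r.toNat []).length with hcon | hcon
        · exact absurd ⟨hr, hrl, hc, by omega⟩ h
        · exact hcon
      rw [List.getD_eq_getElem?_getD, List.getElem?_eq_none hcl]
      rfl
    · have hrow : field.getD r.toNat [] = [] := by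
        rw [List.getD_eq_getElem?_getD, List.getElem?_eq_none (by omega : field.length ≤ r.toNat)]
        rfl
      rw [hrow]
      rfl

theorem cellB_eq_fget (field : List (List Int)) (r c : Int) (hr : 0 ≤ r) (hc : 0 ≤ c) :
    cellB field r c = fget field r c := by
  rw [cellB_nonneg field r c hr hc, fget_nonneg field r c hr hc]

theorem gd_bounds (field : List (List Int)) (a b : Nat)
    (h : (field.getD a []).getD b 0 = 1) :
    a < field.length ∧ b < (field.getD a []).length := by
  by_cases ha : a < field.length
  · refine ⟨ha, ?_⟩
    by_cases hb : b < (field.getD a []).length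
    · exact hb
    · rw [List.getD_eq_getElem?_getD, List.getElem?_eq_none (by omega)] at h
      simp at h
  · exfalso
    have hrow : field.getD a [] = [] := by
      rw [List.getD_eq_getElem?_getD, List.getElem?_eq_none (by omega : field.length ≤ a)]
      rfl
    rw [hrow] at h
    simp [List.getD] at h

theorem mem_addCert (field : List (List Int)) (r c : Int) (s : PySem.Set (Int × Int)) (x : Int × Int) :
    x ∈ addCert field r c s ↔ x ∈ s ∨ ∃ d ∈ deltas, certCond field r c d = true ∧ x = (r + d.1, c + d.2) := by
  simp only [addCert, deltas, List.foldl_cons, List.foldl_nil]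
  split_ifs <;> simp_all [PySem.Set.mem_add] <;> tauto

theorem mem_inner (field : List (List Int)) (r : Int) (l : List (Int × Int))
    (s : PySem.Set (Int × Int)) (x : Int × Int) :
    x ∈ l.foldl (fun s cv => if cv.2 == 1 then addCert field r cv.1 s else s) s ↔
      x ∈ s ∨ ∃ cv ∈ l, cv.2 = 1 ∧ ∃ d ∈ deltas, certCond field r cv.1 d = true ∧ x = (r + d.1, cv.1 + d.2) := by
  induction l generalizing s with
  | nil => simp
  | cons cv l ih =>
    rw [List.foldl_cons]
    by_cases h : cv.2 = 1
    · rw [if_pos (by simp [h]), ih, mem_addCert]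
      constructor
      · rintro ((hs | ⟨d, hd, hcd, hx⟩) | ⟨cv', hm, rest⟩)
        · exact Or.inl hs
        · exact Or.inr ⟨cv, by simp, h, d, hd, hcd, hx⟩
        · exact Or.inr ⟨cv', by simp [hm], rest⟩
      · rintro (hs | ⟨cv', hm, h2, d, hd, hcd, hx⟩)
        · exact Or.inl (Or.inl hs)
        · rcases List.mem_cons.mp hm with rfl | hm'
          · exact Or.inl (Or.inr ⟨d, hd, hcd, hx⟩)
          · exact Or.inr ⟨cv', hm', h2, d, hd, hcd, hx⟩
    · rw [if_neg (by simp [h]), ih]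
      constructor
      · rintro (hs | ⟨cv', hm, rest⟩)
        · exact Or.inl hs
        · exact Or.inr ⟨cv', by simp [hm], rest⟩
      · rintro (hs | ⟨cv', hm, h2, rest⟩)
        · exact Or.inl hs
        · rcases List.mem_cons.mp hm with rfl | hm'
          · exact absurd h2 h
          · exact Or.inr ⟨cv', hm', h2, rest⟩

theorem mem_outer (field : List (List Int)) (l : List (Int × List Int))
    (s : PySem.Set (Int × Int)) (x : Int × Int) :
    x ∈ l.foldl (fun s rr => (PySem.List.enumerate rr.2).foldl
        (fun s cv => if cv.2 == 1 then addCert field rr.1 cv.1 s else s) s) s ↔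
      x ∈ s ∨ ∃ rr ∈ l, ∃ cv ∈ PySem.List.enumerate rr.2, cv.2 = 1 ∧
        ∃ d ∈ deltas, certCond field rr.1 cv.1 d = true ∧ x = (rr.1 + d.1, cv.1 + d.2) := by
  induction l generalizing s with
  | nil => simp
  | cons rr l ih =>
    rw [List.foldl_cons, ih, mem_inner]
    constructor
    · rintro ((hs | ⟨cv, hcv, rest⟩) | ⟨rr', hm, rest⟩)
      · exact Or.inl hs
      · exact Or.inr ⟨rr, by simp, cv, hcv, rest⟩
      · exact Or.inr ⟨rr', by simp [hm], rest⟩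
    · rintro (hs | ⟨rr', hm, rest⟩)
      · exact Or.inl (Or.inl hs)
      · rcases List.mem_cons.mp hm with rfl | hm'
        · exact Or.inl (Or.inr rest)
        · exact Or.inr ⟨rr', hm', rest⟩

theorem mem_certSet (field : List (List Int)) (x : Int × Int) :
    x ∈ certSet field ↔
      ∃ (r c : Nat), r < field.length ∧ c < (field.getD r []).length ∧
        (field.getD r []).getD c 0 = 1 ∧
        ∃ d ∈ deltas, certCond field (r : Int) (c : Int) d = true ∧
          x = ((r : Int) + d.1, (c : Int) + d.2) := by
  rw [certSet, mem_outer]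
  simp only [PySem.Set.empty, List.not_mem_nil, false_or]
  constructor
  · rintro ⟨rr, hrr, cv, hcv, h1, d, hd, hcd, rfl⟩
    rw [PySem.List.mem_enumerate_iff] at hrr
    obtain ⟨r, hr, rfl⟩ := hrr
    rw [PySem.List.mem_enumerate_iff] at hcv
    obtain ⟨c, hc, rfl⟩ := hcv
    simp only [zero_add] at h1 hcd ⊢
    refine ⟨r, c, hr, ?_, ?_, d, hd, hcd, rfl⟩
    · rw [List.getD_eq_getElem field [] hr]
      exact hc
    · rw [List.getD_eq_getElem field [] hr, List.getD_eq_getElem _ 0 hc]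
      simpa using h1
  · rintro ⟨r, c, hr, hc, h1, d, hd, hcd, rfl⟩
    have hrow : field.getD r [] = field[r] := List.getD_eq_getElem field [] hr
    rw [hrow] at hc h1
    rw [List.getD_eq_getElem _ 0 hc] at h1
    refine ⟨((r : Int), field[r]), ?_, ((c : Int), field[r][c]), ?_, h1, d, hd, hcd, rfl⟩
    · rw [PySem.List.mem_enumerate_iff]
      exact ⟨r, hr, by simp⟩
    · rw [PySem.List.mem_enumerate_iff]
      exact ⟨c, hc, by simp⟩

theorem contains_certSet (field : List (List Int)) (p : Int × Int) :
    PySem.Set.contains (certSet field) p = condA field p := by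
  rw [Bool.eq_iff_iff, PySem.Set.contains_iff, mem_certSet]
  simp only [condA, Bool.and_eq_true, Bool.or_eq_true, decide_eq_true_eq, beq_iff_eq]
  constructor
  · rintro ⟨r, c, hr, hc, h1, d, hd, hcd, rfl⟩
    simp only [certCond, Bool.and_eq_true, decide_eq_true_eq] at hcd
    obtain ⟨⟨hint, he1⟩, he2⟩ := hcd
    obtain ⟨hi0, hi19, hj0, hj19⟩ := hint
    have hdiag : fget field (r : Int) (c : Int) = 1 := by
      rw [fget_nonneg field _ _ (by omega) (by omega)]
      simpa using h1
    refine ⟨⟨hi0, hi19, hj0, hj19⟩, ?_⟩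
    simp only [deltas, List.mem_cons, List.not_mem_nil, or_false] at hd
    rcases hd with rfl | rfl | rfl | rfl <;>
      dsimp only at he1 he2 hi0 hi19 hj0 hj19 ⊢
    · -- d = (1,1): branch 1
      refine Or.inl (Or.inl (Or.inl ⟨⟨?_, ?_⟩, ?_⟩))
      · rw [show ((r : Int) + 1 - 1) = (r : Int) from by ring,
            ← cellB_eq_fget field _ _ (by omega) (by omega)]
        exact he1
      · rw [show ((c : Int) + 1 - 1) = (c : Int) from by ring,
            ← cellB_eq_fget field _ _ (by omega) (by omega)]
        exact he2
      · rw [show ((r : Int) + 1 - 1) = (r : Int) from by ring,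
            show ((c : Int) + 1 - 1) = (c : Int) from by ring]
        exact hdiag
    · -- d = (1,-1): branch 4
      refine Or.inr ⟨⟨?_, ?_⟩, ?_⟩
      · rw [show ((c : Int) + -1 + 1) = (c : Int) from by ring,
            ← cellB_eq_fget field _ _ (by omega) (by omega)]
        exact he2
      · rw [show ((r : Int) + 1 - 1) = (r : Int) from by ring,
            ← cellB_eq_fget field _ _ (by omega) (by omega)]
        exact he1
      · rw [show ((r : Int) + 1 - 1) = (r : Int) from by ring,
            show ((c : Int) + -1 + 1) = (c : Int) from by ring]
        exact hdiag
    · -- d = (-1,1): branch 2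
      refine Or.inl (Or.inl (Or.inr ⟨⟨?_, ?_⟩, ?_⟩))
      · rw [show ((c : Int) + 1 - 1) = (c : Int) from by ring,
            ← cellB_eq_fget field _ _ (by omega) (by omega)]
        exact he2
      · rw [show ((r : Int) + -1 + 1) = (r : Int) from by ring,
            ← cellB_eq_fget field _ _ (by omega) (by omega)]
        exact he1
      · rw [show ((r : Int) + -1 + 1) = (r : Int) from by ring,
            show ((c : Int) + 1 - 1) = (c : Int) from by ring]
        exact hdiag
    · -- d = (-1,-1): branch 3
      refine Or.inl (Or.inr ⟨⟨?_, ?_⟩, ?_⟩)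
      · rw [show ((r : Int) + -1 + 1) = (r : Int) from by ring,
            ← cellB_eq_fget field _ _ (by omega) (by omega)]
        exact he1
      · rw [show ((c : Int) + -1 + 1) = (c : Int) from by ring,
            ← cellB_eq_fget field _ _ (by omega) (by omega)]
        exact he2
      · rw [show ((r : Int) + -1 + 1) = (r : Int) from by ring,
            show ((c : Int) + -1 + 1) = (c : Int) from by ring]
        exact hdiag
  · rintro ⟨⟨hi0, hi19, hj0, hj19⟩, hbr⟩
    rcases hbr with ((⟨⟨hg1, hg2⟩, hdg⟩ | ⟨⟨hg1, hg2⟩, hdg⟩) | ⟨⟨hg1, hg2⟩, hdg⟩) | ⟨⟨hg1, hg2⟩, hdg⟩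
    · -- branch 1: diag (i-1, j-1), d = (1,1)
      have h1 : (field.getD (p.1 - 1).toNat []).getD (p.2 - 1).toNat 0 = 1 := by
        rw [← fget_nonneg field _ _ (by omega) (by omega)]
        exact hdg
      obtain ⟨ha, hb⟩ := gd_bounds field _ _ h1
      have er : ((p.1 - 1).toNat : Int) = p.1 - 1 := Int.toNat_of_nonneg (by omega)
      have ec : ((p.2 - 1).toNat : Int) = p.2 - 1 := Int.toNat_of_nonneg (by omega)
      refine ⟨(p.1 - 1).toNat, (p.2 - 1).toNat, ha, hb, h1, (1, 1), by simp [deltas], ?_, ?_⟩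
      · simp only [certCond, Bool.and_eq_true, decide_eq_true_eq, er, ec]
        refine ⟨⟨⟨by omega, by omega, by omega, by omega⟩, ?_⟩, ?_⟩
        · rw [show (p.2 - 1 + 1 : Int) = p.2 from by ring,
              cellB_eq_fget field _ _ (by omega) (by omega)]
          exact hg1
        · rw [show (p.1 - 1 + 1 : Int) = p.1 from by ring,
              cellB_eq_fget field _ _ (by omega) (by omega)]
          exact hg2
      · rw [er, ec]
        dsimp only
        rw [show (p.1 - 1 + 1 : Int) = p.1 from by ring,
            show (p.2 - 1 + 1 : Int) = p.2 from by ring]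
    · -- branch 2: diag (i+1, j-1), d = (-1,1)
      have h1 : (field.getD (p.1 + 1).toNat []).getD (p.2 - 1).toNat 0 = 1 := by
        rw [← fget_nonneg field _ _ (by omega) (by omega)]
        exact hdg
      obtain ⟨ha, hb⟩ := gd_bounds field _ _ h1
      have er : ((p.1 + 1).toNat : Int) = p.1 + 1 := Int.toNat_of_nonneg (by omega)
      have ec : ((p.2 - 1).toNat : Int) = p.2 - 1 := Int.toNat_of_nonneg (by omega)
      refine ⟨(p.1 + 1).toNat, (p.2 - 1).toNat, ha, hb, h1, (-1, 1), by simp [deltas], ?_, ?_⟩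
      · simp only [certCond, Bool.and_eq_true, decide_eq_true_eq, er, ec]
        refine ⟨⟨⟨by omega, by omega, by omega, by omega⟩, ?_⟩, ?_⟩
        · rw [show (p.2 - 1 + 1 : Int) = p.2 from by ring,
              cellB_eq_fget field _ _ (by omega) (by omega)]
          exact hg2
        · rw [show (p.1 + 1 + -1 : Int) = p.1 from by ring,
              cellB_eq_fget field _ _ (by omega) (by omega)]
          exact hg1
      · rw [er, ec]
        dsimp only
        rw [show (p.1 + 1 + -1 : Int) = p.1 from by ring,
            show (p.2 - 1 + 1 : Int) = p.2 from by ring]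
    · -- branch 3: diag (i+1, j+1), d = (-1,-1)
      have h1 : (field.getD (p.1 + 1).toNat []).getD (p.2 + 1).toNat 0 = 1 := by
        rw [← fget_nonneg field _ _ (by omega) (by omega)]
        exact hdg
      obtain ⟨ha, hb⟩ := gd_bounds field _ _ h1
      have er : ((p.1 + 1).toNat : Int) = p.1 + 1 := Int.toNat_of_nonneg (by omega)
      have ec : ((p.2 + 1).toNat : Int) = p.2 + 1 := Int.toNat_of_nonneg (by omega)
      refine ⟨(p.1 + 1).toNat, (p.2 + 1).toNat, ha, hb, h1, (-1, -1), by simp [deltas], ?_, ?_⟩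
      · simp only [certCond, Bool.and_eq_true, decide_eq_true_eq, er, ec]
        refine ⟨⟨⟨by omega, by omega, by omega, by omega⟩, ?_⟩, ?_⟩
        · rw [show (p.2 + 1 + -1 : Int) = p.2 from by ring,
              cellB_eq_fget field _ _ (by omega) (by omega)]
          exact hg1
        · rw [show (p.1 + 1 + -1 : Int) = p.1 from by ring,
              cellB_eq_fget field _ _ (by omega) (by omega)]
          exact hg2
      · rw [er, ec]
        dsimp only
        rw [show (p.1 + 1 + -1 : Int) = p.1 from by ring,
            show (p.2 + 1 + -1 : Int) = p.2 from by ring]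
    · -- branch 4: diag (i-1, j+1), d = (1,-1)
      have h1 : (field.getD (p.1 - 1).toNat []).getD (p.2 + 1).toNat 0 = 1 := by
        rw [← fget_nonneg field _ _ (by omega) (by omega)]
        exact hdg
      obtain ⟨ha, hb⟩ := gd_bounds field _ _ h1
      have er : ((p.1 - 1).toNat : Int) = p.1 - 1 := Int.toNat_of_nonneg (by omega)
      have ec : ((p.2 + 1).toNat : Int) = p.2 + 1 := Int.toNat_of_nonneg (by omega)
      refine ⟨(p.1 - 1).toNat, (p.2 + 1).toNat, ha, hb, h1, (1, -1), by simp [deltas], ?_, ?_⟩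
      · simp only [certCond, Bool.and_eq_true, decide_eq_true_eq, er, ec]
        refine ⟨⟨⟨by omega, by omega, by omega, by omega⟩, ?_⟩, ?_⟩
        · rw [show (p.2 + 1 + -1 : Int) = p.2 from by ring,
              cellB_eq_fget field _ _ (by omega) (by omega)]
          exact hg2
        · rw [show (p.1 - 1 + 1 : Int) = p.1 from by ring,
              cellB_eq_fget field _ _ (by omega) (by omega)]
          exact hg1
      · rw [er, ec]
        dsimp only
        rw [show (p.1 - 1 + 1 : Int) = p.1 from by ring,
            show (p.2 + 1 + -1 : Int) = p.2 from by ring]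

-- ===== VERDICT (by name: the statement is the Claim_ definition above) =====
theorem selectPutPlaces_spec : Claim_equal_selectPutPlaces := by
  intro cp field _ _
  unfold Spec_selectPutPlaces selectPutPlaces selectPutPlaces_alt
  rw [foldl_stepA]
  simp only [List.nil_append]
  have : cp.filter (fun p => PySem.Set.contains (certSet field) p) = cp.filter (condA field) := by
    apply List.filter_congr
    intro p _
    rw [contains_certSet]
  rw [this]
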